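-- pv_equiv track=rewrite | github.com/Weeks-UNC/shapemapper2 | python/pyshapemap/pipeline_arg_parser.py | split_sample_args
-- ===== SOURCE A (Python) =====
-- def split_sample_args(args):
--     """
--     argparse chokes on repeated subparser options,
--     so need to "manually" group args by sample name. There's
--     probably a better way to do this.
--     """
--     samples = ["modified", "untreated", "unmodified", "denatured", "correct-seq"]
--     groups = {}
--     rest = []
--     current_sample = ""
--     for i in range(len(args)):
--         # match against sample names
--         matches = []
--         v = args[i][2:]
--         for sample in samples:
--             if v == sample[:len(v)]:
--                 matches.append(sample)
--         if len(matches) > 1: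
--             msg = 'Error: ambiguous sample argument "{}". Use "modified", "untreated",'
--             msg += ' "unmodified", "denatured", or "correct-seq".'
--             msg = msg.format(args[i])
--             raise RuntimeError(msg)
--         elif len(matches) == 1:
--             current_sample = matches[0].replace("correct-seq","correct_seq")
--             groups[current_sample] = []
--         elif current_sample != "":
--             groups[current_sample].append(args[i])
--         else:
--             rest.append(args[i])
--     if "untreated" in groups and "unmodified" in groups:
--         msg = 'Error: specify either "--untreated" or "--unmodified", not both '
--         msg += '(these are two names for the same sample)'
--         raise RuntimeError(msg)
--
--     if "unmodified" in groups:
--         groups["untreated"] = groups.pop("unmodified")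
--
--     return groups, rest
-- ===== SOURCE B (Python) =====
-- def _marker(arg):
--     """Return the normalized sample name arg selects ("" if none); raise on ambiguity."""
--     samples = ["modified", "untreated", "unmodified", "denatured", "correct-seq"]
--     v = arg[2:]
--     matches = [s for s in samples if s.startswith(v)]
--     if len(matches) > 1:
--         msg = 'Error: ambiguous sample argument "{}". Use "modified", "untreated",'
--         msg += ' "unmodified", "denatured", or "correct-seq".'
--         raise RuntimeError(msg.format(arg))
--     return matches[0].replace("correct-seq", "correct_seq") if matches else ""
--
--
-- def _leading_plain(tagged, start):
--     """Args from the leading run of non-marker entries of tagged[start:]."""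
--     out = []
--     for k in range(start, len(tagged)):
--         name, arg = tagged[k]
--         if name != "":
--             break
--         out.append(arg)
--     return out
--
--
-- def split_sample_args(args):
--     # tag every arg with its marker name ("" = plain value arg); ambiguity checked for all args
--     tagged = [(_marker(a), a) for a in args]
--     rest = _leading_plain(tagged, 0)
--     groups = {}
--     # tagged[i] is always a marker here; peel off one marker and its segment at a time
--     i = len(rest)
--     while i < len(tagged):
--         seg = _leading_plain(tagged, i + 1)
--         groups[tagged[i][0]] = seg
--         i += 1 + len(seg)
--     if "untreated" in groups and "unmodified" in groups:
--         msg = 'Error: specify either "--untreated" or "--unmodified", not both '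
--         msg += '(these are two names for the same sample)'
--         raise RuntimeError(msg)
--     if "unmodified" in groups:
--         groups["untreated"] = groups.pop("unmodified")
--     return groups, rest
-- ===== Notes on version B (the rewrite author's own statement) =====
-- stated objective: alternative
-- what changed: A's single stateful loop (current_sample state, dict reset/append per arg) is replaced by a two-phase decomposition: first tag every arg with its ambiguity-checked marker name, then take the leading non-marker run as rest and peel off marker-headed segments to build the groups dict.
import Mathlib
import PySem

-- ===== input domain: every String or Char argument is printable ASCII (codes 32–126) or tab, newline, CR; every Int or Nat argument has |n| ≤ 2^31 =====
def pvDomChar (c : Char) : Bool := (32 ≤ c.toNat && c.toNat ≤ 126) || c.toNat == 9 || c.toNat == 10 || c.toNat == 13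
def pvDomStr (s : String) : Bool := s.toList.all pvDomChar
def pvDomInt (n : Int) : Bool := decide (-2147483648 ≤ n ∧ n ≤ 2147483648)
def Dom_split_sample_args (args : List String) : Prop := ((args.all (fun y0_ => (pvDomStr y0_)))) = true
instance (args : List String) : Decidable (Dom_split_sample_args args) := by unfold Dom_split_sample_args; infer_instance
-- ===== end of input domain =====

-- B replaces A's single stateful loop by a two-phase decomposition (tag every arg with its
-- marker name, then peel off marker-headed segments); objective: alternative, same cost.


-- ===== PORT A =====
def pvSamplesA : List String := ["modified", "untreated", "unmodified", "denatured", "correct-seq"]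

-- matches = []; v = args[i][2:]; for sample in samples: if v == sample[:len(v)]: matches.append(sample)
def pvMatchesA (arg : String) : List String :=
  let v := PySem.Str.slice arg (some 2) none
  pvSamplesA.foldl
    (fun acc s => if v == PySem.Str.slice s none (some (PySem.Str.len v)) then acc ++ [s] else acc) []

-- A's for-loop over args with state (groups, rest, current_sample); none = RuntimeError (ambiguous)
def pvLoopA : List String → PySem.Dict String (List String) → List String → String →
    Option (PySem.Dict String (List String) × List String)
  | [], g, r, _ => some (g, r)
  | a :: t, g, r, c =>
    let m := pvMatchesA a
    if 1 < m.length then none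
    else if m.length == 1 then
      let cur := PySem.Str.replace (m.headD "") "correct-seq" "correct_seq"
      pvLoopA t (g.insert cur []) r cur
    else if c ≠ "" then
      pvLoopA t (g.modify c [] (fun l => l ++ [a])) r c
    else
      pvLoopA t g (r ++ [a]) c

def split_sample_args (args : List String) : (List (String × List String)) × List String :=
  match pvLoopA args PySem.Dict.empty [] "" with
  | none => ([], [])                                   -- RuntimeError (ambiguous), excluded by Pre_
  | some (g, r) =>
    if g.contains "untreated" && g.contains "unmodified" then ([], [])  -- RuntimeError, excluded by Pre_
    else if g.contains "unmodified" then
      match g.pop? "unmodified" with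
      | some (v, g') => ((g'.insert "untreated" v).items, r)
      | none => (g.items, r)
    else (g.items, r)

-- ===== PORT B =====
def pvSamplesB : List String := ["modified", "untreated", "unmodified", "denatured", "correct-seq"]

-- _marker: normalized sample name this arg selects ("" if plain); none = RuntimeError (ambiguous)
def pvMarkerB (arg : String) : Option String :=
  let v := PySem.Str.slice arg (some 2) none
  let ms := pvSamplesB.filter (fun s => PySem.Str.startswith s v)
  if 1 < ms.length then none
  else some (match ms with
    | [] => ""
    | s :: _ => PySem.Str.replace s "correct-seq" "correct_seq")

-- _leading_plain: args from the leading run of non-marker entries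
def pvLeadingPlain (tagged : List (String × String)) : List String :=
  (tagged.takeWhile (fun p => p.1 == "")).map (fun p => p.2)

-- B's while-loop over tail: peel one marker and its following segment at a time
def pvGroupsB : List (String × String) → PySem.Dict String (List String) → PySem.Dict String (List String)
  | [], g => g
  | (n, _) :: tail, g =>
    let seg := pvLeadingPlain tail
    pvGroupsB (tail.drop seg.length) (g.insert n seg)
  termination_by tagged _ => tagged.length
  decreasing_by simp [pvLeadingPlain]

def split_sample_args_alt (args : List String) : (List (String × List String)) × List String :=
  match args.mapM pvMarkerB with
  | none => ([], [])                                   -- RuntimeError (ambiguous), excluded by Pre_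
  | some names =>
    let tagged := names.zip args
    let rest := pvLeadingPlain tagged
    let tail := tagged.drop rest.length
    let groups := pvGroupsB tail PySem.Dict.empty
    if groups.contains "untreated" && groups.contains "unmodified" then ([], [])  -- RuntimeError, excluded by Pre_
    else if groups.contains "unmodified" then
      match groups.pop? "unmodified" with
      | some (v, g') => ((g'.insert "untreated" v).items, rest)
      | none => (groups.items, rest)
    else (groups.items, rest)

-- ===== PRECONDITION & SPEC =====
-- the sample names that arg[2:] prefix-matches, and the marker name it selects ("" if none)
def pvPrefixMatches (a : String) : List String :=
  ["modified", "untreated", "unmodified", "denatured", "correct-seq"].filter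
    (fun s => PySem.Str.startswith s (PySem.Str.slice a (some 2) none))

def pvNameOf (a : String) : String :=
  match pvPrefixMatches a with
  | [] => ""
  | s :: _ => PySem.Str.replace s "correct-seq" "correct_seq"

-- Pre_ excludes exactly the inputs where the Python raises RuntimeError: some argument whose
-- characters after the first two prefix-match more than one sample name (ambiguous argument),
-- or marker arguments selecting both "untreated" and "unmodified".
def Pre_split_sample_args (args : List String) : Prop :=
  (∀ a ∈ args, (pvPrefixMatches a).length ≤ 1) ∧
  ¬ ((∃ a ∈ args, pvNameOf a = "untreated") ∧ (∃ a ∈ args, pvNameOf a = "unmodified"))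
instance (args : List String) : Decidable (Pre_split_sample_args args) := by
  unfold Pre_split_sample_args; infer_instance

def pvWitness_split_sample_args : List String := ["--modified", "r1.fq", "--untreated", "r2.fq"]

def Spec_split_sample_args (args : List String) (out : (List (String × List String)) × List String) : Prop := out = split_sample_args_alt args
instance (args : List String) (out : (List (String × List String)) × List String) : Decidable (Spec_split_sample_args args out) := by unfold Spec_split_sample_args; infer_instance

-- ===== CLAIM (what is proved, stated in full; the proofs are below) =====
def Claim_equal_split_sample_args : Prop := ∀ (args : List String), Dom_split_sample_args args → Pre_split_sample_args args → Spec_split_sample_args args (split_sample_args args)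

-- ===== LEMMAS AND PROOFS =====

-- the tagged list B builds, seen through pvNameOf
def pvTag (args : List String) : List (String × String) := args.map (fun a => (pvNameOf a, a))

-- A's per-sample test 'v == sample[:len(v)]' is B's 'sample.startswith(v)'
theorem pv_cond_eq (v s : String) :
    (v == PySem.Str.slice s none (some (PySem.Str.len v))) = PySem.Str.startswith s v := by
  have hw : (PySem.Str.slice s none (some (PySem.Str.len v))).toList
      = s.toList.take v.toList.length := by
    rw [PySem.Str.toList_slice, PySem.Chars.slice_eq_listSlice, PySem.Str.len_eq,
      PySem.List.slice_to_natCast]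
  rw [Bool.eq_iff_iff, beq_iff_eq, PySem.Str.startswith_eq, PySem.Chars.startswith_iff,
    List.prefix_iff_eq_take, ← String.toList_inj, hw]

theorem pv_matchesA_eq (a : String) : pvMatchesA a = pvPrefixMatches a := by
  unfold pvMatchesA pvSamplesA pvPrefixMatches
  simp only [pv_cond_eq]
  rw [PySem.List.foldl_append_if
    (fun s => PySem.Str.startswith s (PySem.Str.slice a (some 2) none)) (fun s => s)]
  simp

theorem pv_markerB_eq (a : String) (h : (pvPrefixMatches a).length ≤ 1) :
    pvMarkerB a = some (pvNameOf a) := by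
  have hF : (["modified", "untreated", "unmodified", "denatured", "correct-seq"].filter
      (fun s => PySem.Str.startswith s (PySem.Str.slice a (some 2) none))) = pvPrefixMatches a := rfl
  simp only [pvMarkerB, pvSamplesB]
  rw [hF, if_neg (by omega)]
  unfold pvNameOf
  exact rfl

theorem pv_name_empty (a : String) (hM : pvPrefixMatches a = []) : pvNameOf a = "" := by
  unfold pvNameOf; rw [hM]

theorem pv_name_ne_empty (a : String) (s : String) (l : List String)
    (hM : pvPrefixMatches a = s :: l) : pvNameOf a ≠ "" := by
  have hs : s ∈ pvPrefixMatches a := by rw [hM]; exact List.mem_cons_self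
  have hmem : s ∈ ["modified", "untreated", "unmodified", "denatured", "correct-seq"] :=
    List.mem_of_mem_filter hs
  have hname : pvNameOf a = PySem.Str.replace s "correct-seq" "correct_seq" := by
    unfold pvNameOf
    rw [hM]
  rw [hname]
  fin_cases hmem <;> decide

theorem pv_mapM_markers (args : List String) (h : ∀ a ∈ args, (pvPrefixMatches a).length ≤ 1) :
    args.mapM pvMarkerB = some (args.map pvNameOf) := by
  induction args with
  | nil => rfl
  | cons a t ih =>
    rw [List.mapM_cons, pv_markerB_eq a (h a List.mem_cons_self),
      ih (fun x hx => h x (List.mem_cons_of_mem _ hx))]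
    rfl

theorem pv_zip_tag (args : List String) : (args.map pvNameOf).zip args = pvTag args := by
  induction args with
  | nil => rfl
  | cons a t ih => simp [pvTag] at ih ⊢; exact ih

theorem pv_leading_len (tg : List (String × String)) :
    (pvLeadingPlain tg).length = (tg.takeWhile (fun p => p.1 == "")).length := by
  simp [pvLeadingPlain]

-- A's loop in mid-group state (current = c, groups[c] = acc so far) computes B's
-- segment-peeling pvGroupsB on the tagged remainder
theorem pv_loopA_group (t : List String) (g : PySem.Dict String (List String))
    (r : List String) (c : String) (acc : List String)
    (h : ∀ a ∈ t, (pvPrefixMatches a).length ≤ 1) (hc : c ≠ "") :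
    pvLoopA t (g.insert c acc) r c =
      some (pvGroupsB ((pvTag t).drop ((pvTag t).takeWhile (fun p => p.1 == "")).length)
              (g.insert c (acc ++ pvLeadingPlain (pvTag t))), r) := by
  induction t generalizing g c acc with
  | nil => simp [pvLoopA, pvTag, pvGroupsB, pvLeadingPlain]
  | cons a t' ih =>
    have ht' : ∀ x ∈ t', (pvPrefixMatches x).length ≤ 1 :=
      fun x hx => h x (List.mem_cons_of_mem _ hx)
    rcases hM : pvPrefixMatches a with _ | ⟨s, l⟩
    · -- plain value arg
      have hn : pvNameOf a = "" := pv_name_empty a hM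
      simp only [pvLoopA, pv_matchesA_eq, hM, List.length_nil]
      rw [if_neg (by omega), if_neg (by decide), if_pos hc]
      rw [show (g.insert c acc).modify c [] (fun l => l ++ [a])
            = g.insert c (acc ++ [a]) by
          simp [PySem.Dict.modify, PySem.Dict.getD_insert_self, PySem.Dict.insert_insert_self]]
      rw [ih (g := g) (c := c) (acc := acc ++ [a]) ht' hc]
      simp [pvTag, hn, pvLeadingPlain, List.append_assoc]
    · -- marker arg
      have hl : l = [] := by
        have := h a List.mem_cons_self
        rw [hM] at this; simp at this; exact this
      subst hl
      have hn : pvNameOf a = PySem.Str.replace s "correct-seq" "correct_seq" := by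
        unfold pvNameOf; rw [hM]
      have hne : pvNameOf a ≠ "" := pv_name_ne_empty a s [] hM
      simp only [pvLoopA, pv_matchesA_eq, hM, List.length_cons, List.length_nil, List.headD_cons]
      rw [if_neg (by omega), if_pos (by decide)]
      rw [← hn]
      rw [ih (g := g.insert c acc) (c := pvNameOf a) (acc := []) ht' hne]
      have htag : pvTag (a :: t') = (pvNameOf a, a) :: pvTag t' := by simp [pvTag]
      rw [htag, List.takeWhile_cons]
      simp only [beq_iff_eq, hne, if_false, List.length_nil, List.drop_zero]
      rw [pvGroupsB]
      simp [pvLeadingPlain, hne]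

-- A's loop in the initial state (current = "") collects rest, then behaves like pv_loopA_group
theorem pv_loopA_rest (t : List String) (g : PySem.Dict String (List String)) (r : List String)
    (h : ∀ a ∈ t, (pvPrefixMatches a).length ≤ 1) :
    pvLoopA t g r "" =
      some (pvGroupsB ((pvTag t).drop ((pvTag t).takeWhile (fun p => p.1 == "")).length) g,
            r ++ pvLeadingPlain (pvTag t)) := by
  induction t generalizing r with
  | nil => simp [pvLoopA, pvTag, pvGroupsB, pvLeadingPlain]
  | cons a t' ih =>
    have ht' : ∀ x ∈ t', (pvPrefixMatches x).length ≤ 1 :=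
      fun x hx => h x (List.mem_cons_of_mem _ hx)
    rcases hM : pvPrefixMatches a with _ | ⟨s, l⟩
    · have hn : pvNameOf a = "" := pv_name_empty a hM
      simp only [pvLoopA, pv_matchesA_eq, hM, List.length_nil]
      rw [if_neg (by omega), if_neg (by decide), if_neg (by simp)]
      rw [ih _ ht']
      simp [pvTag, hn, pvLeadingPlain, List.append_assoc]
    · have hl : l = [] := by
        have := h a List.mem_cons_self
        rw [hM] at this; simp at this; exact this
      subst hl
      have hn : pvNameOf a = PySem.Str.replace s "correct-seq" "correct_seq" := by
        unfold pvNameOf; rw [hM]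
      have hne : pvNameOf a ≠ "" := pv_name_ne_empty a s [] hM
      simp only [pvLoopA, pv_matchesA_eq, hM, List.length_cons, List.length_nil, List.headD_cons]
      rw [if_neg (by omega), if_pos (by decide)]
      rw [← hn]
      rw [pv_loopA_group t' g r (pvNameOf a) [] ht' hne]
      have htag : pvTag (a :: t') = (pvNameOf a, a) :: pvTag t' := by simp [pvTag]
      rw [htag, List.takeWhile_cons]
      simp only [beq_iff_eq, hne, if_false, List.length_nil, List.drop_zero]
      rw [pvGroupsB]
      simp [pvLeadingPlain, hne]

-- ===== VERDICT (by name: the statement is the Claim_ definition above) =====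
theorem split_sample_args_spec : Claim_equal_split_sample_args := by
  intro args _dom hpre
  obtain ⟨h1, _h2⟩ := hpre
  unfold Spec_split_sample_args split_sample_args split_sample_args_alt
  rw [pv_mapM_markers args h1, pv_loopA_rest args PySem.Dict.empty [] h1]
  simp only [pv_zip_tag, pv_leading_len, List.nil_append]
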